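-- pv_equiv track=rewrite | github.com/Bartosz7/VCC-vigeneres-cipher-cracker | funcs.py | find_distance
-- ===== SOURCE A (Python) =====
-- def find_distance(text, el, num):
--     """
--
--     :param text: text
--     :param el: name of repeating fragment
--     :param num: number of appearings of such fragment
--     :return: the distance between two exact fragments
--     """
--     list_of_distances = []
--     k = 0
--     for i in range(num):
--         try:
--             p = text.index(el, k)
--             q = text.index(el, p + 1)
--             distance = (q - p)                 # earlier: distance = (1-p-(len(el)))
--             list_of_distances.append(distance)
--             k += distance + len(el) - 1
--         except ValueError:
--             continue
--     return list_of_distances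
-- ===== SOURCE B (Python) =====
-- def find_distance(text, el, num):
--     """
--
--     :param text: text
--     :param el: name of repeating fragment
--     :param num: number of appearings of such fragment
--     :return: the distance between two exact fragments
--     """
--     # Precompute every occurrence position of el in text once (overlapping included),
--     # then walk that sorted list with a single forward pointer instead of re-scanning
--     # the text with str.index on every one of the num iterations.  Once a lookup
--     # fails the loop state can never change again, so we stop instead of spinning.
--     occ = []
--     s = text.find(el)
--     while s != -1:
--         occ.append(s)
--         s = text.find(el, s + 1)
--     distances = []
--     k = 0
--     j = 0
--     step = len(el) - 1
--     while len(distances) < num: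
--         while j < len(occ) and occ[j] < k:
--             j += 1
--         if j + 1 >= len(occ):
--             break
--         p, q = occ[j], occ[j + 1]
--         distances.append(q - p)
--         k += q - p + step
--     return distances
-- ===== Notes on version B (the rewrite author's own statement) =====
-- stated objective: faster
-- what changed: B precomputes the sorted list of all occurrence positions once and replays the distance recurrence with a single forward pointer into that list, stopping as soon as a lookup fails, instead of calling str.index from scratch in each of the num loop iterations.
import Mathlib
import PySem

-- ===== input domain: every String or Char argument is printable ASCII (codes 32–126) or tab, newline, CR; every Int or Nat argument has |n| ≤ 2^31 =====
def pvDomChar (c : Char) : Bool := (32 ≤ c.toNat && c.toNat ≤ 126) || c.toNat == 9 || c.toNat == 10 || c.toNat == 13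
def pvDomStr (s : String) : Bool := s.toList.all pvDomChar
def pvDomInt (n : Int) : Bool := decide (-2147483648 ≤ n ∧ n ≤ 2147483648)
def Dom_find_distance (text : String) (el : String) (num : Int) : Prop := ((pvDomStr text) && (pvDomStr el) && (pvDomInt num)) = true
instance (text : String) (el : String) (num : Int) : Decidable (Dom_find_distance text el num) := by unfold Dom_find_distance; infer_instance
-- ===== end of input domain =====

-- B replaces A's `num` independent str.index scans by one precomputed occurrence list
-- walked with a forward pointer, stopping once a lookup fails; return values are equal.

-- ===== PORT A =====
-- the for-loop of A: fuel = remaining iterations of `range(num)`, state (k, acc);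
-- text.index(el, k) is PySem.Chars.findFrom (-1 = ValueError, caught by `except: continue`)
def findA_go (T E : List Char) : Nat → Int → List Int → List Int
  | 0, _, acc => acc
  | fuel + 1, k, acc =>
      let p := PySem.Chars.findFrom T E k none
      if p = -1 then findA_go T E fuel k acc
      else
        let q := PySem.Chars.findFrom T E (p + 1) none
        if q = -1 then findA_go T E fuel k acc
        else findA_go T E fuel (k + (q - p) + (E.length : Int) - 1) (acc ++ [q - p])

def find_distance (text : String) (el : String) (num : Int) : List Int :=
  findA_go text.toList el.toList num.toNat 0 []

-- ===== PORT B =====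
-- B's first while loop: collect every occurrence position (text.find(el, s+1) each round).
-- fuel T.length+1 suffices: the positions strictly increase within [0, T.length].
def buildOcc (T E : List Char) : Nat → Int → List Int
  | 0, _ => []
  | fuel + 1, s =>
      if s = -1 then []
      else s :: buildOcc T E fuel (PySem.Chars.findFrom T E (s + 1) none)

-- B's inner `while j < len(occ) and occ[j] < k: j += 1`
def advance (occ : List Int) (k : Int) (j : Nat) : Nat :=
  if h : j < occ.length ∧ occ.getD j 0 < k then advance occ k (j + 1) else j
termination_by occ.length - j
decreasing_by omega

-- B's main `while len(distances) < num` loop: each pass appends exactly one element,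
-- so fuel = num.toNat - len(res) renders the loop condition; state (k, j, res)
def scanB (occ : List Int) (step : Int) : Nat → Int → Nat → List Int → List Int
  | 0, _, _, res => res
  | fuel + 1, k, j, res =>
      let j' := advance occ k j
      if occ.length ≤ j' + 1 then res
      else
        let p := occ.getD j' 0
        let q := occ.getD (j' + 1) 0
        scanB occ step fuel (k + (q - p) + step) j' (res ++ [q - p])

def find_distance_alt (text : String) (el : String) (num : Int) : List Int :=
  scanB (buildOcc text.toList el.toList (text.toList.length + 1)
          (PySem.Chars.find text.toList el.toList))
        ((el.toList.length : Int) - 1) num.toNat 0 0 []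

-- ===== PRECONDITION & SPEC =====
def Spec_find_distance (text : String) (el : String) (num : Int) (out : List Int) : Prop := out = find_distance_alt text el num
instance (text : String) (el : String) (num : Int) (out : List Int) : Decidable (Spec_find_distance text el num out) := by unfold Spec_find_distance; infer_instance

-- ===== CLAIM (what is proved, stated in full; the proofs are below) =====
def Claim_equal_find_distance : Prop := ∀ (text : String) (el : String) (num : Int), Dom_find_distance text el num → Spec_find_distance text el num (find_distance text el num)

-- ===== LEMMAS AND PROOFS =====

def Occ (T E : List Char) (i : Nat) : Prop := i ≤ T.length ∧ E <+: T.drop i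

theorem findFrom_past_len (T E : List Char) (k : Int) (h : (T.length : Int) < k) :
    PySem.Chars.findFrom T E k none = -1 := by
  simp only [PySem.Chars.findFrom]
  have h0 : ¬ (k < 0) := by omega
  simp [h0, h]

theorem infix_iff_occ (T E : List Char) (kn : Nat) (hk : kn ≤ T.length) :
    E <:+: T.drop kn ↔ ∃ i : Nat, kn ≤ i ∧ Occ T E i := by
  constructor
  · intro h
    obtain ⟨j, hj⟩ := (PySem.Chars.exists_prefix_drop_iff_isIn E (T.drop kn)).mpr
      ((PySem.Chars.isIn_iff_infix E (T.drop kn)).mpr h)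
    rw [List.drop_drop] at hj
    by_cases hle : kn + j ≤ T.length
    · exact ⟨kn + j, by omega, hle, hj⟩
    · have hE : E = [] := List.prefix_nil.mp (by rwa [List.drop_eq_nil_of_le (by omega)] at hj)
      exact ⟨kn, le_rfl, hk, hE ▸ List.nil_prefix⟩
  · rintro ⟨i, hki, _, hpre⟩
    have h2 : E <+: (T.drop kn).drop (i - kn) := by
      rw [List.drop_drop, Nat.add_sub_cancel' hki]; exact hpre
    exact h2.isInfix.trans (List.drop_suffix _ _).isInfix

theorem findFrom_eq_neg_one_iff_occ (T E : List Char) (k : Int) (hk : 0 ≤ k) :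
    PySem.Chars.findFrom T E k none = -1 ↔ ∀ i : Nat, k ≤ (i : Int) → ¬ Occ T E i := by
  by_cases hlen : k ≤ (T.length : Int)
  · have hk' : k = ((k.toNat : Nat) : Int) := by omega
    rw [hk', PySem.Chars.findFrom_natCast_eq_neg_one_iff T E k.toNat (by omega),
      infix_iff_occ T E k.toNat (by omega)]
    constructor
    · intro h i hi hOcc; exact h ⟨i, by omega, hOcc⟩
    · rintro h ⟨i, hi, hOcc⟩; exact h i (by omega) hOcc
  · rw [findFrom_past_len T E k (by omega)]
    exact iff_of_true rfl (fun i hi hOcc => by have := hOcc.1; omega)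

theorem findFrom_spec_occ (T E : List Char) (k : Int) (hk : 0 ≤ k)
    (h : PySem.Chars.findFrom T E k none ≠ -1) :
    k ≤ PySem.Chars.findFrom T E k none ∧
    (PySem.Chars.findFrom T E k none) ≤ (T.length : Int) ∧
    Occ T E (PySem.Chars.findFrom T E k none).toNat ∧
    (∀ i : Nat, k ≤ (i : Int) → (i : Int) < PySem.Chars.findFrom T E k none → ¬ Occ T E i) := by
  by_cases hlen : k ≤ (T.length : Int)
  · have hk' : k = ((k.toNat : Nat) : Int) := by omega
    rw [hk'] at h ⊢
    have hnc := PySem.Chars.findFrom_natCast T E k.toNat (by omega)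
    rw [hnc] at h ⊢
    have hne : PySem.Chars.find (T.drop k.toNat) E ≠ -1 := by
      intro h0; rw [if_pos h0] at h; exact h rfl
    have hf0 : 0 ≤ PySem.Chars.find (T.drop k.toNat) E := by
      have := PySem.Chars.neg_one_le_find (T.drop k.toNat) E; omega
    have hfle := PySem.Chars.find_le_length (T.drop k.toNat) E
    rw [List.length_drop] at hfle
    rw [if_neg hne]
    obtain ⟨hpre, hmin⟩ := PySem.Chars.find_spec hf0
    rw [List.drop_drop] at hpre
    set f := PySem.Chars.find (T.drop k.toNat) E with hfdef
    have htn : ((k.toNat : Int) + f).toNat = k.toNat + f.toNat := by omega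
    refine ⟨by omega, by omega, ?_, ?_⟩
    · rw [htn]
      exact ⟨by omega, hpre⟩
    · intro i hki hilt hOcc
      have h1 : i - k.toNat < f.toNat := by omega
      have h2 := hmin (i - k.toNat) h1
      rw [List.drop_drop, Nat.add_sub_cancel' (by omega : k.toNat ≤ i)] at h2
      exact h2 hOcc.2
  · exact absurd (findFrom_past_len T E k (by omega)) h

theorem findFrom_eq_of (T E : List Char) (k : Int) (p : Nat) (hk : 0 ≤ k)
    (hp : Occ T E p) (hkp : k ≤ (p : Int))
    (hmin : ∀ i : Nat, k ≤ (i : Int) → i < p → ¬ Occ T E i) :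
    PySem.Chars.findFrom T E k none = (p : Int) := by
  have hne : PySem.Chars.findFrom T E k none ≠ -1 := fun h0 =>
    ((findFrom_eq_neg_one_iff_occ T E k hk).mp h0) p hkp hp
  obtain ⟨h1, _, h3, h4⟩ := findFrom_spec_occ T E k hk hne
  set r := PySem.Chars.findFrom T E k none
  by_cases hlt : r.toNat < p
  · exact absurd h3 (hmin r.toNat (by omega) hlt)
  · by_cases hgt : (p : Int) < r
    · exact absurd hp (h4 p hkp hgt)
    · omega


theorem buildOcc_neg_one (T E : List Char) (fuel : Nat) : buildOcc T E fuel (-1) = [] := by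
  cases fuel <;> simp [buildOcc]

theorem buildOcc_ge (T E : List Char) (fuel : Nat) (s : Int) (hs : 0 ≤ s) :
    ∀ x ∈ buildOcc T E fuel s, s ≤ x := by
  induction fuel generalizing s with
  | zero => simp [buildOcc]
  | succ f ih =>
    intro x hx
    rw [buildOcc, if_neg (by omega : ¬ s = -1)] at hx
    rcases List.mem_cons.mp hx with h | h
    · omega
    · by_cases h2 : PySem.Chars.findFrom T E (s + 1) none = -1
      · rw [h2, buildOcc_neg_one] at h; cases h
      · have hge := (findFrom_spec_occ T E (s + 1) (by omega) h2).1
        have := ih (PySem.Chars.findFrom T E (s + 1) none) (by omega) x h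
        omega

theorem buildOcc_pairwise (T E : List Char) (fuel : Nat) (s : Int) (hs : s = -1 ∨ 0 ≤ s) :
    List.Pairwise (· < ·) (buildOcc T E fuel s) := by
  induction fuel generalizing s with
  | zero => simp [buildOcc]
  | succ f ih =>
    rcases hs with h | h
    · rw [h, buildOcc_neg_one]; exact List.Pairwise.nil
    · rw [buildOcc, if_neg (by omega : ¬ s = -1)]
      refine List.pairwise_cons.mpr ⟨?_, ?_⟩
      · intro x hx
        by_cases h2 : PySem.Chars.findFrom T E (s + 1) none = -1
        · rw [h2, buildOcc_neg_one] at hx; cases hx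
        · have hge := (findFrom_spec_occ T E (s + 1) (by omega) h2).1
          have := buildOcc_ge T E f (PySem.Chars.findFrom T E (s + 1) none) (by omega) x hx
          omega
      · by_cases h2 : PySem.Chars.findFrom T E (s + 1) none = -1
        · exact ih _ (Or.inl h2)
        · have hge := (findFrom_spec_occ T E (s + 1) (by omega) h2).1
          exact ih _ (Or.inr (by omega))

def matchFirst (occ : List Int) (k : Int) : Int :=
  match occ.find? (fun x => decide (k ≤ x)) with
  | some x => x
  | none => -1

theorem matchFirst_nil (k : Int) : matchFirst [] k = -1 := rfl
theorem matchFirst_cons_lt (x : Int) (r : List Int) (k : Int) (h : x < k) :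
    matchFirst (x :: r) k = matchFirst r k := by
  have hd : decide (k ≤ x) = false := by simp; omega
  simp [matchFirst, hd]
theorem matchFirst_cons_le (x : Int) (r : List Int) (k : Int) (h : k ≤ x) :
    matchFirst (x :: r) k = x := by
  simp [matchFirst, h]

theorem buildOcc_matchFirst (T E : List Char) (fuel : Nat) (t : Nat)
    (hfuel : T.length + 1 ≤ t + fuel) :
    ∀ k : Int, (t : Int) ≤ k →
      matchFirst (buildOcc T E fuel (PySem.Chars.findFrom T E (t : Int) none)) k =
        PySem.Chars.findFrom T E k none := by
  induction fuel generalizing t with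
  | zero =>
    intro k hk
    have h1 : PySem.Chars.findFrom T E (t : Int) none = -1 :=
      findFrom_past_len T E _ (by omega)
    rw [h1, buildOcc_neg_one, matchFirst_nil,
      Eq.comm, findFrom_eq_neg_one_iff_occ T E k (by omega)]
    intro i hi hOcc
    have := hOcc.1; omega
  | succ f ih =>
    intro k hk
    by_cases h1 : PySem.Chars.findFrom T E (t : Int) none = -1
    · rw [h1, buildOcc_neg_one, matchFirst_nil, Eq.comm,
        findFrom_eq_neg_one_iff_occ T E k (by omega)]
      have hall := (findFrom_eq_neg_one_iff_occ T E (t : Int) (by omega)).mp h1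
      intro i hi hOcc
      exact hall i (by omega) hOcc
    · obtain ⟨hge, hle, hOccp, hminp⟩ := findFrom_spec_occ T E (t : Int) (by omega) h1
      set p := PySem.Chars.findFrom T E (t : Int) none with hpdef
      rw [buildOcc, if_neg h1]
      by_cases hkp : k ≤ p
      · rw [matchFirst_cons_le _ _ _ hkp]
        have : PySem.Chars.findFrom T E k none = (p.toNat : Int) := by
          refine findFrom_eq_of T E k p.toNat (by omega) hOccp (by omega) ?_
          intro i hik hip
          exact hminp i (by omega) (by omega)
        omega
      · rw [matchFirst_cons_lt _ _ _ (by omega)]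
        have harg : p + 1 = ((p.toNat + 1 : Nat) : Int) := by push_cast; omega
        rw [harg]
        exact ih (p.toNat + 1) (by omega) k (by omega)

theorem matchFirst_drop (occ : List Int) (k : Int) (j : Nat) (hj : j ≤ occ.length)
    (hlt : ∀ i : Nat, i < j → occ.getD i 0 < k) :
    matchFirst occ k = matchFirst (occ.drop j) k := by
  induction j generalizing occ with
  | zero => rfl
  | succ n ih =>
    cases occ with
    | nil => simp at hj
    | cons x r =>
      have hx : x < k := by have := hlt 0 (by omega); simpa using this
      rw [matchFirst_cons_lt _ _ _ hx, List.drop_succ_cons]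
      exact ih r (by simpa using hj) (fun i hi => by have := hlt (i+1) (by omega); simpa using this)




theorem findA_go_succ (T E : List Char) (f : Nat) (k : Int) (acc : List Int) :
    findA_go T E (f + 1) k acc =
      (if PySem.Chars.findFrom T E k none = -1 then findA_go T E f k acc
       else if PySem.Chars.findFrom T E (PySem.Chars.findFrom T E k none + 1) none = -1 then
         findA_go T E f k acc
       else
         findA_go T E f
           (k + (PySem.Chars.findFrom T E (PySem.Chars.findFrom T E k none + 1) none -
                  PySem.Chars.findFrom T E k none) + (E.length : Int) - 1)
           (acc ++ [PySem.Chars.findFrom T E (PySem.Chars.findFrom T E k none + 1) none -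
                  PySem.Chars.findFrom T E k none])) := rfl

theorem scanB_succ (occ : List Int) (step : Int) (f : Nat) (k : Int) (j : Nat) (res : List Int) :
    scanB occ step (f + 1) k j res =
      (if occ.length ≤ advance occ k j + 1 then res
       else scanB occ step f
         (k + (occ.getD (advance occ k j + 1) 0 - occ.getD (advance occ k j) 0) + step)
         (advance occ k j)
         (res ++ [occ.getD (advance occ k j + 1) 0 - occ.getD (advance occ k j) 0])) := rfl

theorem advance_spec (occ : List Int) (k : Int) (j : Nat) (hj : j ≤ occ.length) :
    j ≤ advance occ k j ∧ advance occ k j ≤ occ.length ∧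
    (∀ i : Nat, j ≤ i → i < advance occ k j → occ.getD i 0 < k) ∧
    (advance occ k j < occ.length → k ≤ occ.getD (advance occ k j) 0) := by
  by_cases h : j < occ.length ∧ occ.getD j 0 < k
  · rw [advance, dif_pos h]
    obtain ⟨ih1, ih2, ih3, ih4⟩ := advance_spec occ k (j + 1) (by omega)
    refine ⟨by omega, ih2, ?_, ih4⟩
    intro i hji hlt
    rcases Nat.eq_or_lt_of_le hji with rfl | hlt2
    · exact h.2
    · exact ih3 i (by omega) hlt
  · rw [advance, dif_neg h]
    refine ⟨le_rfl, hj, by omega, ?_⟩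
    intro hlt
    have h2 := not_and.mp h hlt
    omega
termination_by occ.length - j
decreasing_by omega

theorem findA_stuck (T E : List Char) (fuel : Nat) (k : Int) (acc : List Int)
    (h : PySem.Chars.findFrom T E k none = -1 ∨
         PySem.Chars.findFrom T E (PySem.Chars.findFrom T E k none + 1) none = -1) :
    findA_go T E fuel k acc = acc := by
  induction fuel with
  | zero => rfl
  | succ f ih =>
    rw [findA_go_succ]
    rcases h with h1 | h1
    · rw [if_pos h1]; exact ih
    · by_cases hp : PySem.Chars.findFrom T E k none = -1
      · rw [if_pos hp]; exact ih
      · rw [if_neg hp, if_pos h1]; exact ih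

theorem occ_matchFirst (T E : List Char) (k : Int) (hk : 0 ≤ k) :
    matchFirst (buildOcc T E (T.length + 1) (PySem.Chars.find T E)) k =
      PySem.Chars.findFrom T E k none := by
  have h := buildOcc_matchFirst T E (T.length + 1) 0 (by omega) k (by exact_mod_cast hk)
  rw [Nat.cast_zero, PySem.Chars.findFrom_zero] at h
  exact h

theorem occ_pairwise (T E : List Char) :
    List.Pairwise (· < ·) (buildOcc T E (T.length + 1) (PySem.Chars.find T E)) := by
  apply buildOcc_pairwise
  have := PySem.Chars.neg_one_le_find T E
  by_cases h : PySem.Chars.find T E = -1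
  · exact Or.inl h
  · exact Or.inr (by omega)

theorem main_gen (T E : List Char) (occ : List Int)
    (hmfAll : ∀ k : Int, 0 ≤ k → matchFirst occ k = PySem.Chars.findFrom T E k none)
    (hpw : List.Pairwise (· < ·) occ)
    (fuel : Nat) (k : Int) (j : Nat) (acc : List Int)
    (hk : 0 ≤ k) (hj : j ≤ occ.length)
    (hinv : ∀ i : Nat, i < j → occ.getD i 0 < k) :
    findA_go T E fuel k acc = scanB occ ((E.length : Int) - 1) fuel k j acc := by
  induction fuel generalizing k j acc with
  | zero => rfl
  | succ f ih =>
    obtain ⟨ha1, ha2, ha3, ha4⟩ := advance_spec occ k j hj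
    set J := advance occ k j with hJ
    have hltJ : ∀ i : Nat, i < J → occ.getD i 0 < k := by
      intro i hi
      by_cases hij : i < j
      · exact hinv i hij
      · exact ha3 i (by omega) hi
    have hdrop := matchFirst_drop occ k J ha2 hltJ
    have hmf : matchFirst occ k = PySem.Chars.findFrom T E k none := hmfAll k hk
    rw [scanB_succ, ← hJ]
    by_cases hguard : occ.length ≤ J + 1
    · rw [if_pos hguard]
      by_cases hJlen : J = occ.length
      · have hFk : PySem.Chars.findFrom T E k none = -1 := by
          rw [← hmf, hdrop, hJlen, List.drop_length, matchFirst_nil]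
        exact findA_stuck T E (f + 1) k acc (Or.inl hFk)
      · have hJlt : J < occ.length := by omega
        have hJeq : J + 1 = occ.length := by omega
        have hkp : k ≤ occ.getD J 0 := ha4 hJlt
        have hdropJ : occ.drop J = [occ.getD J 0] := by
          rw [List.drop_eq_getElem_cons hJlt, List.getD_eq_getElem occ 0 hJlt]
          rw [show occ.drop (J + 1) = [] from by rw [hJeq, List.drop_length]]
        have hFk : PySem.Chars.findFrom T E k none = occ.getD J 0 := by
          rw [← hmf, hdrop, hdropJ, matchFirst_cons_le _ _ _ hkp]
        have hp0 : 0 ≤ occ.getD J 0 := le_trans hk hkp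
        have hFq : PySem.Chars.findFrom T E (occ.getD J 0 + 1) none = -1 := by
          have hd2 := matchFirst_drop occ (occ.getD J 0 + 1) (J + 1) (by omega) ?_
          · rw [hmfAll (occ.getD J 0 + 1) (by omega)] at hd2
            rw [hd2, hJeq, List.drop_length, matchFirst_nil]
          · intro i hi
            by_cases hij : i < J
            · have := hltJ i hij; omega
            · have : i = J := by omega
              rw [this]; omega
        exact findA_stuck T E (f + 1) k acc (Or.inr (by rw [hFk]; exact hFq))
    · rw [if_neg hguard]
      have hJ1 : J + 1 < occ.length := by omega
      have hkp : k ≤ occ.getD J 0 := ha4 (by omega)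
      have hpq : occ.getD J 0 < occ.getD (J + 1) 0 := by
        have hpw := List.pairwise_iff_getElem.mp hpw J (J + 1) (by omega) (by omega) (by omega)
        rw [List.getD_eq_getElem occ 0 (by omega), List.getD_eq_getElem occ 0 hJ1]
        exact hpw
      have hFk : PySem.Chars.findFrom T E k none = occ.getD J 0 := by
        rw [← hmf, hdrop, List.drop_eq_getElem_cons (by omega : J < occ.length),
          ← List.getD_eq_getElem occ 0 (by omega : J < occ.length),
          matchFirst_cons_le _ _ _ hkp]
      have hFq : PySem.Chars.findFrom T E (occ.getD J 0 + 1) none = occ.getD (J + 1) 0 := by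
        have hd2 := matchFirst_drop occ (occ.getD J 0 + 1) (J + 1) (by omega) ?_
        · rw [hmfAll (occ.getD J 0 + 1) (by omega)] at hd2
          rw [hd2, List.drop_eq_getElem_cons hJ1,
            ← List.getD_eq_getElem occ 0 hJ1,
            matchFirst_cons_le _ _ _ (by omega)]
        · intro i hi
          by_cases hij : i < J
          · have := hltJ i hij; omega
          · have : i = J := by omega
            rw [this]; omega
      rw [findA_go_succ, hFk, hFq, if_neg (by omega), if_neg (by omega)]
      have harith : k + (occ.getD (J + 1) 0 - occ.getD J 0) + (E.length : Int) - 1 =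
          k + (occ.getD (J + 1) 0 - occ.getD J 0) + ((E.length : Int) - 1) := by ring
      rw [harith]
      have hq1 : occ.getD J 0 + 1 ≤ occ.getD (J + 1) 0 := Int.lt_iff_add_one_le.mp hpq
      have hk' : 0 ≤ k + (occ.getD (J + 1) 0 - occ.getD J 0) + ((E.length : Int) - 1) := by
        have h0 : (0 : Int) ≤ (E.length : Int) := by positivity
        linarith
      exact ih _ J _ hk' ha2 (fun i hi => by have := hltJ i hi; omega)

theorem main_loop (T E : List Char) (fuel : Nat) (k : Int) (j : Nat) (acc : List Int)
    (hk : 0 ≤ k) (hj : j ≤ (buildOcc T E (T.length + 1) (PySem.Chars.find T E)).length)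
    (hinv : ∀ i : Nat, i < j → (buildOcc T E (T.length + 1) (PySem.Chars.find T E)).getD i 0 < k) :
    findA_go T E fuel k acc =
      scanB (buildOcc T E (T.length + 1) (PySem.Chars.find T E)) ((E.length : Int) - 1)
        fuel k j acc :=
  main_gen T E _ (fun k hk => occ_matchFirst T E k hk) (occ_pairwise T E) fuel k j acc hk hj hinv

-- ===== VERDICT (by name: the statement is the Claim_ definition above) =====
theorem find_distance_spec : Claim_equal_find_distance := by
  intro text el num _
  unfold Spec_find_distance find_distance find_distance_alt
  exact main_loop text.toList el.toList num.toNat 0 0 [] le_rfl (Nat.zero_le _) (by omega)
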